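-- pv_equiv track=rewrite | github.com/sosomalouf0606-hue/EP2---Maria-Sofia-e-Mariana-Yunes | EP2/funcoes.py | calcula_pontos_quina
-- ===== SOURCE A (Python) =====
-- def calcula_pontos_quina(dados_rolados):
--     i = 0
--     while i < len(dados_rolados):
--         contador = 0
--         dado = dados_rolados[i]
--         k = 0
--         while k < len(dados_rolados):
--             if dados_rolados[k] == dado:
--                 contador += 1
--             k += 1
--         if contador >= 5:
--             return 50
--         i += 1
--     return 0
-- ===== SOURCE B (Python) =====
-- def calcula_pontos_quina(dados_rolados):
--     run = 0
--     prev = None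
--     for x in sorted(dados_rolados):
--         run = run + 1 if x == prev else 1
--         prev = x
--         if run >= 5:
--             return 50
--     return 0
-- ===== Notes on version B (the rewrite author's own statement) =====
-- stated objective: faster
-- what changed: Replaced the quadratic nested count-scan with sorted() plus one linear adjacency pass that tracks the current run length and returns 50 as soon as a run reaches 5.
import Mathlib
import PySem

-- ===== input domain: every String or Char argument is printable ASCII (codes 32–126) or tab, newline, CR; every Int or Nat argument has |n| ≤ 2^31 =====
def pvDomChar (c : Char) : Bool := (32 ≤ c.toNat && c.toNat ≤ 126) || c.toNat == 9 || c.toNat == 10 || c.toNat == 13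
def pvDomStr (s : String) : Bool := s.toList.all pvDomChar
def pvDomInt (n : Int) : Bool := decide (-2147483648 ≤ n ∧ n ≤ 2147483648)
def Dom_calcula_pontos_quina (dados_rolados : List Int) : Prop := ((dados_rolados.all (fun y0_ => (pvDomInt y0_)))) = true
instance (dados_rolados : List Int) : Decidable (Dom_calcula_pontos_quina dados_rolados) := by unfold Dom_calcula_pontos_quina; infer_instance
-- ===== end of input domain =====

-- B replaces A's quadratic nested count-scan by sorted() + one linear run-length pass (asymptotically faster).

-- ===== PORT A =====
-- inner 'while k' loop: counts occurrences of dado in the full list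
def pvInnerCount (l : List Int) (dado : Int) : Int :=
  l.foldl (fun contador x => if x = dado then contador + 1 else contador) 0

-- outer 'while i' loop: walks the indices (here: the elements, in order), full list kept alongside
def pvOuterLoop (rest full : List Int) : Int :=
  match rest with
  | [] => 0
  | dado :: rest' => if pvInnerCount full dado ≥ 5 then 50 else pvOuterLoop rest' full

def calcula_pontos_quina (dados_rolados : List Int) : Int :=
  pvOuterLoop dados_rolados dados_rolados

-- ===== PORT B =====
-- single pass over the sorted copy, keeping (prev, run); returns 50 the moment run reaches 5
def pvRunLoop (l : List Int) (prev : Option Int) (run : Int) : Int :=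
  match l with
  | [] => 0
  | x :: rest =>
    let run' := if some x = prev then run + 1 else 1
    if run' ≥ 5 then 50 else pvRunLoop rest (some x) run'

def calcula_pontos_quina_alt (dados_rolados : List Int) : Int :=
  pvRunLoop (PySem.List.sorted dados_rolados (fun x => x) false) none 0

-- ===== PRECONDITION & SPEC =====
def Spec_calcula_pontos_quina (dados_rolados : List Int) (out : Int) : Prop := out = calcula_pontos_quina_alt dados_rolados
instance (dados_rolados : List Int) (out : Int) : Decidable (Spec_calcula_pontos_quina dados_rolados out) := by unfold Spec_calcula_pontos_quina; infer_instance

-- ===== CLAIM (what is proved, stated in full; the proofs are below) =====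
def Claim_equal_calcula_pontos_quina : Prop := ∀ (dados_rolados : List Int), Dom_calcula_pontos_quina dados_rolados → Spec_calcula_pontos_quina dados_rolados (calcula_pontos_quina dados_rolados)

-- ===== LEMMAS AND PROOFS =====

theorem pvInnerCount_eq_count (l : List Int) (d : Int) :
    pvInnerCount l d = (l.count d : Int) := by
  unfold pvInnerCount
  have h : ∀ (c : Int), l.foldl (fun contador x => if x = d then contador + 1 else contador) c
      = c + (l.count d : Int) := by
    induction l with
    | nil => intro c; simp
    | cons x rest ih =>
      intro c
      by_cases hx : x = d <;> simp [hx, ih] <;> ring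
  simpa using h 0

theorem pvOuterLoop_eq (rest full : List Int) :
    pvOuterLoop rest full = if ∃ d ∈ rest, (full.count d : Int) ≥ 5 then 50 else 0 := by
  induction rest with
  | nil => simp [pvOuterLoop]
  | cons d rest' ih =>
    simp only [pvOuterLoop, pvInnerCount_eq_count, ih]
    by_cases h : (full.count d : Int) ≥ 5
    · rw [if_pos h, if_pos ⟨d, List.mem_cons_self, h⟩]
    · rw [if_neg h]
      by_cases h2 : ∃ e ∈ rest', (full.count e : Int) ≥ 5
      · rw [if_pos h2, if_pos]
        obtain ⟨e, he, hc⟩ := h2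
        exact ⟨e, List.mem_cons_of_mem _ he, hc⟩
      · rw [if_neg h2, if_neg]
        rintro ⟨e, he, hc⟩
        rcases List.mem_cons.mp he with rfl | he'
        · exact h hc
        · exact h2 ⟨e, he', hc⟩

theorem pvRunLoop_eq (l : List Int) (p : Option Int) (r : Int)
    (hs : l.Pairwise (· ≤ ·)) (hp : ∀ q, p = some q → ∀ z ∈ l, q ≤ z) :
    pvRunLoop l p r =
      if ∃ y ∈ l, (if some y = p then r else 0) + (l.count y : Int) ≥ 5 then 50 else 0 := by
  induction l generalizing p r with
  | nil => simp [pvRunLoop]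
  | cons x rest ih =>
    have hs' : rest.Pairwise (· ≤ ·) := (List.pairwise_cons.mp hs).2
    have hxle : ∀ z ∈ rest, x ≤ z := (List.pairwise_cons.mp hs).1
    simp only [pvRunLoop]
    set r' : Int := if some x = p then r + 1 else 1 with hr'
    have hcx : (List.count x (x :: rest) : Int) = (rest.count x : Int) + 1 := by
      push_cast [List.count_cons_self]; ring
    have hcount : ∀ y, y ≠ x → List.count y (x :: rest) = rest.count y := by
      intro y h; simp [Ne.symm h]
    by_cases hbig : r' ≥ 5
    · rw [if_pos hbig, if_pos]
      refine ⟨x, List.mem_cons_self, ?_⟩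
      by_cases hxp : some x = p
      · rw [if_pos hxp, hcx]; rw [hr', if_pos hxp] at hbig
        have h0 : (0:Int) ≤ (rest.count x : Int) := Int.natCast_nonneg _
        omega
      · rw [if_neg hxp, hcx]; rw [hr', if_neg hxp] at hbig; omega
    · rw [if_neg hbig,
        ih (some x) r' hs' (by intro q hq z hz; injection hq with h; subst h; exact hxle z hz)]
      congr 1
      apply propext
      constructor
      · rintro ⟨y, hy, hge⟩
        by_cases hyx : y = x
        · subst hyx
          refine ⟨y, List.mem_cons_self, ?_⟩
          rw [if_pos rfl] at hge
          by_cases hyp : some y = p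
          · rw [if_pos hyp, hcx]; rw [hr', if_pos hyp] at hge; omega
          · rw [if_neg hyp, hcx]; rw [hr', if_neg hyp] at hge; omega
        · refine ⟨y, List.mem_cons_of_mem _ hy, ?_⟩
          have hyp : some y ≠ p := fun hyp => by
            have h1 := hp y hyp.symm x List.mem_cons_self
            have h2 := hxle y hy
            exact hyx (le_antisymm h1 h2)
          rw [if_neg (fun h => hyx (Option.some_injective _ h))] at hge
          rw [if_neg hyp, hcount y hyx]
          exact hge
      · rintro ⟨y, hy, hge⟩
        by_cases hyx : y = x
        · subst hyx
          have hmem : y ∈ rest := by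
            by_contra hn
            have hc0 : rest.count y = 0 := List.count_eq_zero.mpr hn
            rw [hcx, hc0] at hge
            by_cases hyp : some y = p
            · rw [if_pos hyp] at hge; rw [hr', if_pos hyp] at hbig; omega
            · rw [if_neg hyp] at hge; rw [hr', if_neg hyp] at hbig; omega
          refine ⟨y, hmem, ?_⟩
          rw [if_pos rfl]
          by_cases hyp : some y = p
          · rw [if_pos hyp, hcx] at hge; rw [hr', if_pos hyp]; omega
          · rw [if_neg hyp, hcx] at hge; rw [hr', if_neg hyp]; omega
        · rcases List.mem_cons.mp hy with h | hy'
          · exact absurd h hyx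
          refine ⟨y, hy', ?_⟩
          have hyp : some y ≠ p := fun hyp => by
            have h1 := hp y hyp.symm x List.mem_cons_self
            have h2 := hxle y hy'
            exact hyx (le_antisymm h1 h2)
          rw [if_neg hyp, hcount y hyx] at hge
          rw [if_neg (fun h => hyx (Option.some_injective _ h))]
          exact hge

-- ===== VERDICT (by name: the statement is the Claim_ definition above) =====
theorem calcula_pontos_quina_spec : Claim_equal_calcula_pontos_quina := by
  intro l _
  unfold Spec_calcula_pontos_quina calcula_pontos_quina calcula_pontos_quina_alt
  set s := PySem.List.sorted l (fun x => x) false with hsdef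
  have hperm : s.Perm l := PySem.List.sorted_perm l (fun x => x) false
  have hpw : s.Pairwise (· ≤ ·) := by
    simpa using PySem.List.sorted_pairwise (xs := l) (key := fun x => x)
  rw [pvOuterLoop_eq, pvRunLoop_eq s none 0 hpw (by intro q hq z hz; exact absurd hq (by simp))]
  congr 1
  apply propext
  constructor
  · rintro ⟨d, hd, hc⟩
    refine ⟨d, hperm.mem_iff.mpr hd, ?_⟩
    simp [hperm.count_eq, hc]
  · rintro ⟨d, hd, hc⟩
    refine ⟨d, hperm.mem_iff.mp hd, ?_⟩
    simpa [hperm.count_eq] using hc
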